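-- pv_equiv track=rewrite | github.com/nikolaytwins/sophiaapp | openrouter_grok_proxy.py | pick_default_image_model
-- ===== SOURCE A (Python) =====
-- def pick_default_image_model(models: list[dict]) -> str:
--     ids = {m["id"] for m in models}
--     preferred = [
--         "google/gemini-2.5-flash-image-preview",
--         "openai/gpt-image-1",
--         "black-forest-labs/flux-1.1-pro",
--         "black-forest-labs/flux-1-schnell",
--     ]
--     for p in preferred:
--         if p in ids:
--             return p
--     return models[0]["id"] if models else "openai/gpt-image-1"
-- ===== SOURCE B (Python) =====
-- def pick_default_image_model(models: list[dict]) -> str: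
--     preferred = [
--         "google/gemini-2.5-flash-image-preview",
--         "openai/gpt-image-1",
--         "black-forest-labs/flux-1.1-pro",
--         "black-forest-labs/flux-1-schnell",
--     ]
--     rank = {pid: i for i, pid in enumerate(preferred)}
--     best = None
--     for m in models:
--         r = rank.get(m["id"])
--         if r is not None and (best is None or r < best):
--             best = r
--     if best is not None:
--         return preferred[best]
--     return models[0]["id"] if models else "openai/gpt-image-1"
-- ===== Notes on version B (the rewrite author's own statement) =====
-- stated objective: alternative
-- what changed: Instead of building a set of model ids and scanning the fixed preference list against it, B builds a rank dict over the preference list and makes one pass over models keeping the minimum rank seen, returning preferred[best] (same fallbacks).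
import Mathlib
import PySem

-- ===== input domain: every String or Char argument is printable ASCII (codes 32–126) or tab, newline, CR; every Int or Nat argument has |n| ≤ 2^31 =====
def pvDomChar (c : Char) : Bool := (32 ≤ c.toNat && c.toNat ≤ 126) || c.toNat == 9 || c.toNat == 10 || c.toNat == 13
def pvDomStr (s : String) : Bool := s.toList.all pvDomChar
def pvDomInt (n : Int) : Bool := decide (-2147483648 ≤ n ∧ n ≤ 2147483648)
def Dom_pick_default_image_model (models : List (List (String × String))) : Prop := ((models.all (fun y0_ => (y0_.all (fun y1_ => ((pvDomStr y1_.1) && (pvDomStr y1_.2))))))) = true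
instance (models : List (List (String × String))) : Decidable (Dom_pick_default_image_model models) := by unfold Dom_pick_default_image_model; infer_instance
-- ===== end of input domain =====

-- B replaces A's "preferred list scanned against a set of model ids" with a single pass over
-- `models` keeping the minimum preference rank (rank dict built once); same value, same cost.

-- m["id"] (first-match dict lookup); total form, exact under Pre_ (key present)
def pvIdOf (m : List (String × String)) : String :=
  ((PySem.Dict.mk m).get? "id").getD ""

def pvPreferred : List String :=
  [ "google/gemini-2.5-flash-image-preview"
  , "openai/gpt-image-1"
  , "black-forest-labs/flux-1.1-pro"
  , "black-forest-labs/flux-1-schnell" ]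

-- ===== PORT A =====
-- the 'for p in preferred: if p in ids: return p' loop
def pvPickLoop (ids : PySem.Set String) (fallback : String) : List String → String
  | [] => fallback
  | p :: rest => if PySem.Set.contains ids p = true then p else pvPickLoop ids fallback rest

def pick_default_image_model (models : List (List (String × String))) : String :=
  let ids : PySem.Set String := PySem.Set.ofList (models.map pvIdOf)
  pvPickLoop ids
    (match models with
     | [] => "openai/gpt-image-1"
     | m :: _ => pvIdOf m)
    pvPreferred

-- ===== PORT B =====
-- rank = {pid: i for i, pid in enumerate(preferred)}
def pvRank : PySem.Dict String Int :=
  (PySem.List.enumerate pvPreferred).foldl (fun d ip => d.insert ip.2 ip.1) PySem.Dict.empty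

-- loop body: r = rank.get(m["id"]); if r is not None and (best is None or r < best): best = r
def pvStep (best : Option Int) (m : List (String × String)) : Option Int :=
  match pvRank.get? (pvIdOf m) with
  | none => best
  | some r =>
    match best with
    | none => some r
    | some b => if r < b then some r else some b

def pick_default_image_model_alt (models : List (List (String × String))) : String :=
  match models.foldl pvStep none with
  | some b => (PySem.List.pyGet? pvPreferred b).getD "openai/gpt-image-1"
  | none =>
    match models with
    | [] => "openai/gpt-image-1"
    | m :: _ => pvIdOf m

-- ===== PRECONDITION & SPEC =====
-- Pre_ excludes exactly the inputs on which Python A raises KeyError: a model dict without key "id".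
def Pre_pick_default_image_model (models : List (List (String × String))) : Prop :=
  ∀ m ∈ models, ((PySem.Dict.mk m).get? "id").isSome = true
instance (models : List (List (String × String))) : Decidable (Pre_pick_default_image_model models) := by
  unfold Pre_pick_default_image_model; infer_instance
def pvWitness_pick_default_image_model : (List (List (String × String))) := [[("id", "x")]]

def Spec_pick_default_image_model (models : List (List (String × String))) (out : String) : Prop := out = pick_default_image_model_alt models
instance (models : List (List (String × String))) (out : String) : Decidable (Spec_pick_default_image_model models out) := by unfold Spec_pick_default_image_model; infer_instance

-- ===== CLAIM (what is proved, stated in full; the proofs are below) =====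
def Claim_equal_pick_default_image_model : Prop := ∀ (models : List (List (String × String))), Dom_pick_default_image_model models → Pre_pick_default_image_model models → Spec_pick_default_image_model models (pick_default_image_model models)

-- ===== LEMMAS AND PROOFS =====

-- combining one observed rank into the running best (= what pvStep does with a looked-up rank)
def pvOmin (a b : Option Int) : Option Int :=
  match a, b with
  | none, b => b
  | some x, none => some x
  | some x, some r => if r < x then some r else some x

-- least preference rank present in a list of ids
def pvG (L : List String) : Option Int :=
  if "google/gemini-2.5-flash-image-preview" ∈ L then some 0
  else if "openai/gpt-image-1" ∈ L then some 1
  else if "black-forest-labs/flux-1.1-pro" ∈ L then some 2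
  else if "black-forest-labs/flux-1-schnell" ∈ L then some 3
  else none

lemma pvRank_get (s : String) :
    pvRank.get? s =
      if s = "google/gemini-2.5-flash-image-preview" then some 0
      else if s = "openai/gpt-image-1" then some 1
      else if s = "black-forest-labs/flux-1.1-pro" then some 2
      else if s = "black-forest-labs/flux-1-schnell" then some 3
      else none := by
  have h : pvRank = PySem.Dict.mk
      [ ("google/gemini-2.5-flash-image-preview", (0 : Int))
      , ("openai/gpt-image-1", 1)
      , ("black-forest-labs/flux-1.1-pro", 2)
      , ("black-forest-labs/flux-1-schnell", 3) ] := by decide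
  rw [h]
  split_ifs with h0 h1 h2 h3
  · subst h0; decide
  · subst h1; decide
  · subst h2; decide
  · subst h3; decide
  · simp [beq_iff_eq, Ne.symm h0, Ne.symm h1, Ne.symm h2, Ne.symm h3,
      PySem.Dict.get?]

lemma pvStep_eq (a : Option Int) (m : List (String × String)) :
    pvStep a m = pvOmin a (pvRank.get? (pvIdOf m)) := by
  unfold pvStep pvOmin
  cases pvRank.get? (pvIdOf m) <;> cases a <;> rfl

lemma pvOmin_assoc (a b c : Option Int) :
    pvOmin (pvOmin a b) c = pvOmin a (pvOmin b c) := by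
  cases a <;> cases b <;> cases c <;> simp only [pvOmin] <;>
    split_ifs <;> simp only [pvOmin] <;> split_ifs <;> simp_all <;> omega

lemma pvG_cons (s : String) (L : List String) :
    pvG (s :: L) = pvOmin (pvRank.get? s) (pvG L) := by
  rw [pvRank_get]
  unfold pvG
  by_cases h0 : s = "google/gemini-2.5-flash-image-preview" <;>
  by_cases h1 : s = "openai/gpt-image-1" <;>
  by_cases h2 : s = "black-forest-labs/flux-1.1-pro" <;>
  by_cases h3 : s = "black-forest-labs/flux-1-schnell" <;>
    simp_all [List.mem_cons, pvOmin] <;> split_ifs <;> simp_all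

lemma foldl_pvStep (ms : List (List (String × String))) (a : Option Int) :
    ms.foldl pvStep a = pvOmin a (pvG (ms.map pvIdOf)) := by
  induction ms generalizing a with
  | nil => cases a <;> simp [pvG, pvOmin]
  | cons m ms ih =>
    simp only [List.foldl_cons, List.map_cons]
    rw [ih, pvStep_eq, pvOmin_assoc, ← pvG_cons]

-- ===== VERDICT (by name: the statement is the Claim_ definition above) =====
theorem pick_default_image_model_spec : Claim_equal_pick_default_image_model := by
  intro models _ _
  unfold Spec_pick_default_image_model
  unfold pick_default_image_model pick_default_image_model_alt
  rw [foldl_pvStep]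
  simp only [pvOmin, pvPreferred, pvPickLoop, pvG]
  have hc : ∀ x : String,
      (PySem.Set.contains (PySem.Set.ofList (models.map pvIdOf)) x = true) ↔
        x ∈ models.map pvIdOf := by
    intro x
    rw [PySem.Set.contains_iff, PySem.Set.mem_ofList]
  split_ifs with h0 h1 h2 h3 <;>
    simp_all [PySem.List.pyGet?, PySem.List.pyIdx?]
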